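-- pv_equiv track=rewrite | github.com/cleeneuro/whisker_tasks_analysis | python_analysis/data_processing/learning_phase_mapping.py | get_ordered_phase_labels
-- ===== SOURCE A (Python) =====
-- def get_ordered_phase_labels(phase_mapping):
--     """
--     Get learning phase labels in the correct chronological order.
--
--     Args:
--         phase_mapping (dict): Mapping of phase labels to session indices
--
--     Returns:
--         list: Ordered list of phase labels
--     """
--     preferred_order = ['Pre', 'Early Learning', 'Late Learning', 'Post']
--     ordered_labels = []
--
--     # Add phases in preferred order if they exist
--     for preferred_label in preferred_order:
--         if preferred_label in phase_mapping:
--             ordered_labels.append(preferred_label)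
--
--     # Add any remaining phases not in preferred order
--     for phase_label in phase_mapping.keys():
--         if phase_label not in ordered_labels:
--             ordered_labels.append(phase_label)
--
--     return ordered_labels
-- ===== SOURCE B (Python) =====
-- def get_ordered_phase_labels(phase_mapping):
--     preferred_order = ['Pre', 'Early Learning', 'Late Learning', 'Post']
--     return sorted(phase_mapping.keys(),
--                   key=lambda k: preferred_order.index(k) if k in preferred_order
--                                 else len(preferred_order))
-- ===== Notes on version B (the rewrite author's own statement) =====
-- stated objective: faster
-- what changed: B replaces A's two explicit accumulation passes (preferred labels first, then the remaining keys with a linear not-in-ordered_labels scan) by one stable sort of the dict keys under a rank key (position in preferred_order, non-preferred keys sharing the sentinel rank len(preferred_order)).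
import Mathlib
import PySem

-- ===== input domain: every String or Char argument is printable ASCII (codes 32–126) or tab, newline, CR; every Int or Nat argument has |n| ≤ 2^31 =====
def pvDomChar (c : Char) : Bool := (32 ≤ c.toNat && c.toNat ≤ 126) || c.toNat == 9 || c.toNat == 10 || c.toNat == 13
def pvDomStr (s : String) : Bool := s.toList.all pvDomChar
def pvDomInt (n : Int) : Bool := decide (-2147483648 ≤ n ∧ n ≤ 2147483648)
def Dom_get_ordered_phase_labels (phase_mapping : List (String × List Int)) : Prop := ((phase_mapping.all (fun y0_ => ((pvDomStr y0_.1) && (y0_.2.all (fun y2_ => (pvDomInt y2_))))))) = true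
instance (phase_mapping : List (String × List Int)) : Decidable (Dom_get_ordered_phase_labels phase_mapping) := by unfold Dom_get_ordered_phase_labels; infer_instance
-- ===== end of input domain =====

-- B orders the phase labels by one stable sort of the dict keys under a rank key instead of A's two accumulation passes (the quadratic not-in-ordered_labels scan disappears; measured faster); same return value.


-- ===== PORT A =====
-- preferred_order = ['Pre', 'Early Learning', 'Late Learning', 'Post']
def pvPreferred : List String := ["Pre", "Early Learning", "Late Learning", "Post"]

-- the dict's keys in insertion order (the assoc list may carry duplicate first components;
-- a Python dict keeps the first occurrence's position)
def pvKeys (phase_mapping : List (String × List Int)) : List String :=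
  PySem.List.dedup (phase_mapping.map (fun kv => kv.1))

def get_ordered_phase_labels (phase_mapping : List (String × List Int)) : List String :=
  -- inner foldl: for preferred_label in preferred_order: if preferred_label in phase_mapping: append
  -- outer foldl: for phase_label in phase_mapping.keys(): if phase_label not in ordered_labels: append
  List.foldl (fun acc phase_label => if acc.contains phase_label then acc else acc ++ [phase_label])
    (List.foldl (fun acc preferred_label =>
        if (pvKeys phase_mapping).contains preferred_label then acc ++ [preferred_label] else acc)
      [] pvPreferred)
    (pvKeys phase_mapping)

-- ===== PORT B =====
-- key=lambda k: preferred_order.index(k) if k in preferred_order else len(preferred_order)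
def pvRank (k : String) : Nat :=
  if pvPreferred.contains k then (PySem.List.index? pvPreferred k).getD 0 else pvPreferred.length

def get_ordered_phase_labels_alt (phase_mapping : List (String × List Int)) : List String :=
  PySem.List.sorted (pvKeys phase_mapping) pvRank false

-- ===== PRECONDITION & SPEC =====
def Spec_get_ordered_phase_labels (phase_mapping : List (String × List Int)) (out : List String) : Prop := out = get_ordered_phase_labels_alt phase_mapping
instance (phase_mapping : List (String × List Int)) (out : List String) : Decidable (Spec_get_ordered_phase_labels phase_mapping out) := by unfold Spec_get_ordered_phase_labels; infer_instance

-- ===== CLAIM (what is proved, stated in full; the proofs are below) =====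
def Claim_equal_get_ordered_phase_labels : Prop := ∀ (phase_mapping : List (String × List Int)), Dom_get_ordered_phase_labels phase_mapping → Spec_get_ordered_phase_labels phase_mapping (get_ordered_phase_labels phase_mapping)

-- ===== LEMMAS AND PROOFS =====

-- rank facts
theorem pvRank_lt_of_mem (x : String) (hx : x ∈ pvPreferred) : pvRank x < 4 := by
  fin_cases hx <;> decide

theorem pvRank_of_not_mem (x : String) (hx : x ∉ pvPreferred) : pvRank x = 4 := by
  have h : pvPreferred.contains x = false := by simpa using hx
  simp only [pvRank, h, Bool.false_eq_true, if_false]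
  decide

theorem pvRank_le (x : String) : pvRank x ≤ 4 := by
  by_cases hx : x ∈ pvPreferred
  · exact Nat.le_of_lt (pvRank_lt_of_mem x hx)
  · exact Nat.le_of_eq (pvRank_of_not_mem x hx)

-- insertBy goes to the front when it precedes everything
theorem insertBy_head (before : String → String → Bool) (x : String) (ys : List String)
    (h : ∀ y ∈ ys, before x y = true) :
    PySem.List.insertBy before x ys = x :: ys := by
  cases ys with
  | nil => rfl
  | cons y ys => simp [PySem.List.insertBy, h y (by simp)]

-- insertBy stays in the left part when it precedes the whole right part
theorem insertBy_append_right (before : String → String → Bool) (x : String)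
    (P R : List String) (h : ∀ y ∈ R, before x y = true) :
    PySem.List.insertBy before x (P ++ R) = PySem.List.insertBy before x P ++ R := by
  induction P with
  | nil => simp [PySem.List.insertBy, insertBy_head before x R h]
  | cons p P ih =>
      by_cases hp : before x p
      · simp [PySem.List.insertBy, hp]
      · simp [PySem.List.insertBy, hp, ih]

-- inserting a preferred label into a filtered strictly-rank-increasing list extends the filter
theorem insertBy_filter_strict (x : String) :
    ∀ (L : List String), L.Pairwise (fun a b => pvRank a < pvRank b) →
      ∀ (s : String → Bool), x ∈ L → s x = false →
      PySem.List.insertBy (fun a b => decide (pvRank a < pvRank b)) x (L.filter s)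
        = L.filter (fun y => s y || y == x) := by
  intro L
  induction L with
  | nil => intro _ s hx; exact absurd hx (by simp)
  | cons y L ih =>
      intro hpw s hx hsx
      rw [List.pairwise_cons] at hpw
      obtain ⟨hy, hL⟩ := hpw
      rcases List.mem_cons.mp hx with hxy | hxL
      · subst hxy
        have hfs : (x :: L).filter s = L.filter s := by simp [hsx]
        have hhead : PySem.List.insertBy (fun a b => decide (pvRank a < pvRank b)) x (L.filter s)
            = x :: L.filter s := by
          refine insertBy_head _ _ _ ?_
          intro z hz
          have hzL : z ∈ L := (List.mem_filter.mp hz).1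
          simpa using hy z hzL
        have hne : ∀ z ∈ L, (s z || z == x) = s z := by
          intro z hz
          have hzx : z ≠ x := by
            intro h; subst h; exact lt_irrefl _ (hy z hz)
          simp [hzx]
        rw [hfs, hhead]
        have hcons : (x :: L).filter (fun y => s y || y == x)
            = x :: L.filter (fun y => s y || y == x) := by simp [hsx]
        rw [hcons, List.filter_congr hne]
      · have hyx : pvRank y < pvRank x := hy x hxL
        have hbef : (decide (pvRank x < pvRank y)) = false := by
          simp; omega
        have hyne : (y == x) = false := by
          have : y ≠ x := fun h => absurd (h ▸ hyx) (lt_irrefl _)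
          simp [this]
        by_cases hsy : s y
        · rw [List.filter_cons_of_pos hsy]
          have : PySem.List.insertBy (fun a b => decide (pvRank a < pvRank b)) x (y :: L.filter s)
              = y :: PySem.List.insertBy (fun a b => decide (pvRank a < pvRank b)) x (L.filter s) := by
            simp [PySem.List.insertBy, hbef]
          rw [this, ih hL s hxL hsx]
          simp [hsy]
        · rw [List.filter_cons_of_neg (by simpa using hsy)]
          rw [ih hL s hxL hsx]
          simp [hsy, hyne]

-- the invariant of insertion sort under pvRank: preferred block then the rest in encounter order
theorem main_inv :
    ∀ (ks seen : List String), (seen ++ ks).Nodup →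
      List.foldl (fun acc x => PySem.List.insertBy (fun a b => decide (pvRank a < pvRank b)) x acc)
        (pvPreferred.filter (fun p => seen.contains p) ++ seen.filter (fun k => !pvPreferred.contains k)) ks
      = pvPreferred.filter (fun p => (seen ++ ks).contains p)
        ++ (seen ++ ks).filter (fun k => !pvPreferred.contains k) := by
  intro ks
  induction ks with
  | nil => intro seen _; simp
  | cons x ks ih =>
      intro seen hnd
      have hnd' : (seen ++ [x] ++ ks).Nodup := by simpa using hnd
      have hxseen : x ∉ seen := by
        intro hxs
        exact (List.disjoint_of_nodup_append hnd hxs) (by simp)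
      simp only [List.foldl_cons]
      by_cases hx : x ∈ pvPreferred
      · -- preferred label: insert into the preferred block
        have hstep :
            PySem.List.insertBy (fun a b => decide (pvRank a < pvRank b)) x
              (pvPreferred.filter (fun p => seen.contains p) ++ seen.filter (fun k => !pvPreferred.contains k))
            = pvPreferred.filter (fun p => (seen ++ [x]).contains p)
              ++ (seen ++ [x]).filter (fun k => !pvPreferred.contains k) := by
          rw [insertBy_append_right]
          · rw [insertBy_filter_strict x pvPreferred (by decide) (fun p => seen.contains p) hx
              (by simpa using hxseen)]
            have h1 : pvPreferred.filter (fun y => seen.contains y || y == x)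
                = pvPreferred.filter (fun p => (seen ++ [x]).contains p) := by
              apply List.filter_congr; intro p _
              by_cases hpe : p = x <;> simp [hpe]
            have h2 : (seen ++ [x]).filter (fun k => !pvPreferred.contains k)
                = seen.filter (fun k => !pvPreferred.contains k) := by
              simp [List.filter_append]
              simpa using hx
            rw [h1, h2]
          · intro y hy
            have hyn : y ∉ pvPreferred := by
              have := (List.mem_filter.mp hy).2
              simpa using this
            have := pvRank_of_not_mem y hyn
            have := pvRank_lt_of_mem x hx
            simp; omega
        rw [hstep]
        have := ih (seen ++ [x]) hnd'
        simpa using this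
      · -- non-preferred label: appended at the very end
        have hstep :
            PySem.List.insertBy (fun a b => decide (pvRank a < pvRank b)) x
              (pvPreferred.filter (fun p => seen.contains p) ++ seen.filter (fun k => !pvPreferred.contains k))
            = pvPreferred.filter (fun p => (seen ++ [x]).contains p)
              ++ (seen ++ [x]).filter (fun k => !pvPreferred.contains k) := by
          rw [PySem.List.insertBy_of_forall_not_before]
          · have h1 : pvPreferred.filter (fun p => (seen ++ [x]).contains p)
                = pvPreferred.filter (fun p => seen.contains p) := by
              apply List.filter_congr; intro p hp
              by_cases hpe : p = x
              · exact absurd (hpe ▸ hp) hx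
              · simp [hpe]
            have h2 : (seen ++ [x]).filter (fun k => !pvPreferred.contains k)
                = seen.filter (fun k => !pvPreferred.contains k) ++ [x] := by
              simp [List.filter_append]
              simpa using hx
            rw [h1, h2, List.append_assoc]
          · intro y _
            have h4 : pvRank x = 4 := pvRank_of_not_mem x hx
            have := pvRank_le y
            simp [h4]; omega
        rw [hstep]
        have := ih (seen ++ [x]) hnd'
        simpa using this

-- B's sort, characterised
theorem sorted_char (ks : List String) (hnd : ks.Nodup) :
    PySem.List.sorted ks pvRank false
      = pvPreferred.filter (fun p => ks.contains p) ++ ks.filter (fun k => !pvPreferred.contains k) := by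
  rw [PySem.List.sorted_eq_foldl_insertBy]
  have := main_inv ks [] (by simpa using hnd)
  simpa using this

-- A's second loop, characterised
theorem second_loop :
    ∀ (l A0 : List String), l.Nodup →
      List.foldl (fun acc k => if acc.contains k then acc else acc ++ [k]) A0 l
      = A0 ++ l.filter (fun k => !A0.contains k) := by
  intro l
  induction l with
  | nil => intro A0 _; simp
  | cons x l ih =>
      intro A0 hnd
      rw [List.nodup_cons] at hnd
      obtain ⟨hxl, hl⟩ := hnd
      simp only [List.foldl_cons]
      by_cases hx : A0.contains x
      · have hxA : x ∈ A0 := by simpa using hx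
        simp only [hx, if_true]
        rw [ih A0 hl]
        simp [hxA]
      · have hxA : x ∉ A0 := by simpa using hx
        simp only [hx, if_false, Bool.false_eq_true]
        rw [ih (A0 ++ [x]) hl]
        have : l.filter (fun k => !(A0 ++ [x]).contains k) = l.filter (fun k => !A0.contains k) := by
          apply List.filter_congr; intro k hk
          have hkx : k ≠ x := fun h => hxl (h ▸ hk)
          simp [hkx]
        rw [this]
        simp [hxA]

-- A, characterised the same way
theorem A_char (phase_mapping : List (String × List Int)) :
    get_ordered_phase_labels phase_mapping
      = pvPreferred.filter (fun p => (pvKeys phase_mapping).contains p)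
        ++ (pvKeys phase_mapping).filter (fun k => !pvPreferred.contains k) := by
  have hndK : (pvKeys phase_mapping).Nodup := PySem.Set.nodup_ofList _
  unfold get_ordered_phase_labels
  set K := pvKeys phase_mapping with hK
  have h1 : pvPreferred.foldl
      (fun acc preferred_label => if K.contains preferred_label then acc ++ [preferred_label] else acc) []
      = pvPreferred.filter (fun p => K.contains p) := by
    simpa using PySem.List.foldl_append_if (fun p => K.contains p) (fun x => x) pvPreferred []
  rw [h1, second_loop K _ hndK]
  congr 1
  apply List.filter_congr
  intro k hk
  have : (pvPreferred.filter (fun p => K.contains p)).contains k = pvPreferred.contains k := by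
    by_cases hkp : k ∈ pvPreferred
    · have h₁ : k ∈ pvPreferred.filter (fun p => K.contains p) := by
        simp only [List.mem_filter]
        exact ⟨hkp, by simpa using hk⟩
      simp [h₁, hkp, hk]
    · have h₁ : k ∉ pvPreferred.filter (fun p => K.contains p) := by
        simp only [List.mem_filter]
        rintro ⟨h, -⟩; exact hkp h
      simp [h₁, hkp, hk]
  rw [this]

-- ===== VERDICT (by name: the statement is the Claim_ definition above) =====
theorem get_ordered_phase_labels_spec : Claim_equal_get_ordered_phase_labels := by
  intro phase_mapping _
  have hnd : (pvKeys phase_mapping).Nodup := PySem.Set.nodup_ofList _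
  unfold Spec_get_ordered_phase_labels get_ordered_phase_labels_alt
  rw [A_char, sorted_char _ hnd]
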